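-- pv_equiv track=rewrite | github.com/buccancs/fyp-multi-sensor-recording-system | scripts/tools/validation/enhance_logging.py | _find_imports_end
-- ===== SOURCE A (Python) =====
-- def _find_imports_end(content: str) -> int:
--     """Find the end of import statements in Python code."""
--     lines = content.split('\n')
--     imports_end_line = 0
--
--     for i, line in enumerate(lines):
--         stripped = line.strip()
--         if stripped.startswith('import ') or stripped.startswith('from '):
--             imports_end_line = i
--         elif stripped and not stripped.startswith('#') and not stripped.startswith('"""'):
--             break
--
--     return len('\n'.join(lines[:imports_end_line + 1])) + 1
-- ===== SOURCE B (Python) =====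
-- def _is_import(line):
--     s = line.strip()
--     return s.startswith('import ') or s.startswith('from ')
--
--
-- def _take_header(lines):
--     """Longest prefix of lines consisting of import/blank/comment/docstring lines."""
--     header = []
--     for line in lines:
--         s = line.strip()
--         if _is_import(line) or not s or s.startswith('#') or s.startswith('"""'):
--             header.append(line)
--         else:
--             break
--     return header
--
--
-- def _last_import_index(header):
--     for j, line in reversed(list(enumerate(header))):
--         if _is_import(line):
--             return j
--     return None
--
--
-- def _find_imports_end(content: str) -> int:
--     """Find the end of import statements in Python code."""
--     lines = content.split('\n')
--     idx = _last_import_index(_take_header(lines))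
--     k = 0 if idx is None else idx
--     return sum(len(line) + 1 for line in lines[:k + 1])
-- ===== Notes on version B (the rewrite author's own statement) =====
-- stated objective: alternative
-- what changed: Replaces A's single stateful scan plus a final join-and-measure re-scan of the prefix by a two-phase decomposition: take the header prefix of import/blank/comment/docstring lines, find the last import line by a backward scan over it, and compute the offset arithmetically as the sum of line length plus one over the kept prefix.
import Mathlib
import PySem

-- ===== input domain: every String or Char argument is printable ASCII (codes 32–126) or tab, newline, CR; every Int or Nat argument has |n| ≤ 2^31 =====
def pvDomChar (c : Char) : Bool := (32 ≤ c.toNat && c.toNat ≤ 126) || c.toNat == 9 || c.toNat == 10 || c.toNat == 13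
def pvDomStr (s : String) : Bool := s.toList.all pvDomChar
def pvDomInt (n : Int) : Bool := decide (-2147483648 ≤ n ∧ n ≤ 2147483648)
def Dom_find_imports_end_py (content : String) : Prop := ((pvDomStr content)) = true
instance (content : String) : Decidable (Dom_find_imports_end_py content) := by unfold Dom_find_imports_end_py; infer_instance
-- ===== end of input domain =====

-- B replaces A's stateful scan plus final join-and-measure re-scan by a two-phase decomposition
-- (take the header prefix, backward-scan it for the last import, sum len(line)+1 arithmetically);
-- same cost, alternative structure.


-- ===== PORT A =====
-- the for-loop of A: i is the running enumerate index, acc the stored imports_end_line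
def pvGoA : List (List Char) → Int → Int → Int
  | [], _, acc => acc
  | l :: rest, i, acc =>
    let s := PySem.Chars.strip l
    if PySem.Chars.startswith s "import ".toList || PySem.Chars.startswith s "from ".toList then
      pvGoA rest (i + 1) i
    else if !s.isEmpty && !PySem.Chars.startswith s "#".toList
            && !PySem.Chars.startswith s "\"\"\"".toList then
      acc
    else
      pvGoA rest (i + 1) acc

def find_imports_end_py (content : String) : Int :=
  let lines := PySem.Chars.splitOn content.toList "\n".toList
  let importsEndLine := pvGoA lines 0 0
  ((PySem.Chars.join "\n".toList
      (PySem.List.slice lines none (some (importsEndLine + 1)))).length : Int) + 1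

-- ===== PORT B =====
def pvIsImport (l : List Char) : Bool :=
  let s := PySem.Chars.strip l
  PySem.Chars.startswith s "import ".toList || PySem.Chars.startswith s "from ".toList

def pvTakeHeader : List (List Char) → List (List Char)
  | [] => []
  | l :: rest =>
    let s := PySem.Chars.strip l
    if pvIsImport l || s.isEmpty || PySem.Chars.startswith s "#".toList
        || PySem.Chars.startswith s "\"\"\"".toList then
      l :: pvTakeHeader rest
    else
      []

-- the backward for-loop of _last_import_index: first import in reversed(list(enumerate(header)))
def pvFindBack : List (Int × List Char) → Option Int
  | [] => none
  | (j, l) :: rest => if pvIsImport l then some j else pvFindBack rest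

def pvLastImportIndex (header : List (List Char)) : Option Int :=
  pvFindBack (PySem.List.enumerate header).reverse

def find_imports_end_py_alt (content : String) : Int :=
  let lines := PySem.Chars.splitOn content.toList "\n".toList
  let k := (pvLastImportIndex (pvTakeHeader lines)).getD 0
  ((PySem.List.slice lines none (some (k + 1))).map (fun l => (l.length : Int) + 1)).sum

-- ===== PRECONDITION & SPEC =====
def Spec_find_imports_end_py (content : String) (out : Int) : Prop := out = find_imports_end_py_alt content
instance (content : String) (out : Int) : Decidable (Spec_find_imports_end_py content out) := by unfold Spec_find_imports_end_py; infer_instance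

-- ===== CLAIM (what is proved, stated in full; the proofs are below) =====
def Claim_equal_find_imports_end_py : Prop := ∀ (content : String), Dom_find_imports_end_py content → Spec_find_imports_end_py content (find_imports_end_py content)

-- ===== LEMMAS AND PROOFS =====

-- concrete named forms of A's two inline conditions (definitionally equal to the inline code)
def pvBreakLine (l : List Char) : Bool :=
  let s := PySem.Chars.strip l
  !s.isEmpty && !PySem.Chars.startswith s "#".toList
    && !PySem.Chars.startswith s "\"\"\"".toList

def pvHeaderLine (l : List Char) : Bool :=
  let s := PySem.Chars.strip l
  pvIsImport l || s.isEmpty || PySem.Chars.startswith s "#".toList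
    || PySem.Chars.startswith s "\"\"\"".toList

-- generic versions of the two scans, abstracted over the line predicates
def pvGoG (impb brkb : List Char → Bool) : List (List Char) → Int → Int → Int
  | [], _, acc => acc
  | l :: rest, i, acc =>
    if impb l then pvGoG impb brkb rest (i + 1) i
    else if brkb l then acc
    else pvGoG impb brkb rest (i + 1) acc

def pvTakeG (hdrb : List Char → Bool) : List (List Char) → List (List Char)
  | [] => []
  | l :: rest => if hdrb l then l :: pvTakeG hdrb rest else []

-- structural (front-to-back) characterisation of the last import index, bridging A and B
def pvLastIdx : List (List Char) → Option Int
  | [] => none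
  | l :: rest =>
    match pvLastIdx rest with
    | some r => some (r + 1)
    | none => if pvIsImport l then some 0 else none

theorem pvGoA_eq_goG (xs : List (List Char)) (i acc : Int) :
    pvGoA xs i acc = pvGoG pvIsImport pvBreakLine xs i acc := by
  induction xs generalizing i acc with
  | nil => rfl
  | cons l rest ih =>
    show (if pvIsImport l then pvGoA rest (i + 1) i
          else if pvBreakLine l then acc else pvGoA rest (i + 1) acc)
        = (if pvIsImport l then pvGoG pvIsImport pvBreakLine rest (i + 1) i
          else if pvBreakLine l then acc else pvGoG pvIsImport pvBreakLine rest (i + 1) acc)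
    split_ifs <;> first | rfl | exact ih _ _

theorem pvTakeHeader_eq_takeG (xs : List (List Char)) :
    pvTakeHeader xs = pvTakeG pvHeaderLine xs := by
  induction xs with
  | nil => rfl
  | cons l rest ih =>
    show (if pvHeaderLine l then l :: pvTakeHeader rest else [])
        = (if pvHeaderLine l then l :: pvTakeG pvHeaderLine rest else [])
    split_ifs with h
    · rw [ih]
    · rfl

theorem pvHeaderLine_eq (l : List Char) : pvHeaderLine l = (pvIsImport l || !pvBreakLine l) := by
  show (pvIsImport l || (PySem.Chars.strip l).isEmpty
      || PySem.Chars.startswith (PySem.Chars.strip l) "#".toList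
      || PySem.Chars.startswith (PySem.Chars.strip l) "\"\"\"".toList)
    = (pvIsImport l || !(!(PySem.Chars.strip l).isEmpty
        && !PySem.Chars.startswith (PySem.Chars.strip l) "#".toList
        && !PySem.Chars.startswith (PySem.Chars.strip l) "\"\"\"".toList))
  cases pvIsImport l <;> cases (PySem.Chars.strip l).isEmpty <;>
    cases PySem.Chars.startswith (PySem.Chars.strip l) "#".toList <;>
    cases PySem.Chars.startswith (PySem.Chars.strip l) "\"\"\"".toList <;> rfl

theorem pvGoG_eq (xs : List (List Char)) (i acc : Int) :
    pvGoG pvIsImport pvBreakLine xs i acc =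
      match pvLastIdx (pvTakeG pvHeaderLine xs) with
      | some r => i + r
      | none => acc := by
  induction xs generalizing i acc with
  | nil => simp [pvGoG, pvTakeG, pvLastIdx]
  | cons l rest ih =>
    simp only [pvGoG, pvTakeG, pvHeaderLine_eq l]
    by_cases hI : pvIsImport l
    · simp only [hI, if_pos, Bool.true_or, ih, pvLastIdx]
      cases h : pvLastIdx (pvTakeG pvHeaderLine rest) with
      | some r => simp; ring
      | none => simp
    · simp only [Bool.not_eq_true] at hI
      simp only [hI, Bool.false_eq_true, if_false, Bool.false_or]
      by_cases hB : pvBreakLine l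
      · simp only [hB, if_true, Bool.not_true, Bool.false_eq_true, if_false, pvLastIdx]
      · simp only [Bool.not_eq_true] at hB
        simp only [hB, Bool.false_eq_true, if_false, Bool.not_false, if_true, ih, pvLastIdx, hI]
        cases h : pvLastIdx (pvTakeG pvHeaderLine rest) with
        | some r => simp; ring
        | none => simp

theorem pvFindBack_append (ys : List (Int × List Char)) (p : Int × List Char) :
    pvFindBack (ys ++ [p]) =
      match pvFindBack ys with
      | some r => some r
      | none => if pvIsImport p.2 then some p.1 else none := by
  induction ys with
  | nil => simp [pvFindBack]
  | cons q ys ih =>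
    obtain ⟨j, l⟩ := q
    by_cases h : pvIsImport l <;> simp [pvFindBack, h, ih]

theorem pvFindBack_enum (xs : List (List Char)) (n : Int) :
    pvFindBack (PySem.List.enumerate xs n).reverse = (pvLastIdx xs).map (· + n) := by
  induction xs generalizing n with
  | nil => simp [PySem.List.enumerate, pvFindBack, pvLastIdx]
  | cons l rest ih =>
    rw [show PySem.List.enumerate (l :: rest) n = (n, l) :: PySem.List.enumerate rest (n + 1) from rfl]
    rw [List.reverse_cons, pvFindBack_append, ih]
    cases h : pvLastIdx rest with
    | some r => simp [pvLastIdx, h]; ring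
    | none =>
      by_cases hi : pvIsImport l <;> simp [pvLastIdx, h, hi]

theorem pvLastIdx_nonneg (xs : List (List Char)) (r : Int) (h : pvLastIdx xs = some r) : 0 ≤ r := by
  induction xs generalizing r with
  | nil => simp [pvLastIdx] at h
  | cons l rest ih =>
    simp only [pvLastIdx] at h
    cases h' : pvLastIdx rest with
    | some q =>
      rw [h'] at h
      simp only [Option.some.injEq] at h
      have := ih q h'
      omega
    | none =>
      rw [h'] at h
      by_cases hi : pvIsImport l <;> simp [hi] at h
      omega

theorem pvSplitOn_go_ne_nil (sep : List Char) (fuel : Nat) (l cur : List Char) (acc : List (List Char)) :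
    PySem.Chars.splitOn.go sep fuel l cur acc ≠ [] := by
  induction fuel generalizing l cur acc with
  | zero => simp [PySem.Chars.splitOn.go]
  | succ fuel ih =>
    cases l with
    | nil => simp [PySem.Chars.splitOn.go]
    | cons c rest =>
      rw [PySem.Chars.splitOn.go]
      split
      · exact ih _ _ _
      · exact ih _ _ _

theorem pvSplitOn_ne_nil (cs sep : List Char) : PySem.Chars.splitOn cs sep ≠ [] :=
  pvSplitOn_go_ne_nil sep _ cs [] []

theorem pvJoinLen (t : List (List Char)) (h : t ≠ []) :
    ((PySem.Chars.join "\n".toList t).length : Int) + 1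
      = (t.map (fun l => (l.length : Int) + 1)).sum := by
  induction t with
  | nil => exact absurd rfl h
  | cons x rest ih =>
    cases rest with
    | nil => simp [PySem.Chars.join_singleton]
    | cons y more =>
      rw [PySem.Chars.join_cons_cons]
      have := ih (by simp)
      simp only [List.map_cons, List.sum_cons, List.length_append] at this ⊢
      push_cast at this ⊢
      simp only [List.length_cons, List.length_nil] at this ⊢
      omega

-- ===== VERDICT (by name: the statement is the Claim_ definition above) =====
theorem find_imports_end_py_spec : Claim_equal_find_imports_end_py := by
  intro content _
  unfold Spec_find_imports_end_py find_imports_end_py find_imports_end_py_alt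
  simp only
  set lines := PySem.Chars.splitOn content.toList "\n".toList with hlines
  have hne : lines ≠ [] := pvSplitOn_ne_nil _ _
  have hk : pvGoA lines 0 0 = (pvLastImportIndex (pvTakeHeader lines)).getD 0 := by
    rw [pvGoA_eq_goG, pvGoG_eq, pvLastImportIndex, pvFindBack_enum, pvTakeHeader_eq_takeG]
    cases h : pvLastIdx (pvTakeG pvHeaderLine lines) <;> simp
  rw [hk]
  set k := (pvLastImportIndex (pvTakeHeader lines)).getD 0 with hkdef
  have hk0 : 0 ≤ k := by
    rw [hkdef, pvLastImportIndex, pvFindBack_enum]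
    cases h : pvLastIdx (pvTakeHeader lines) with
    | none => simp
    | some r => have := pvLastIdx_nonneg _ _ h; simp; omega
  rw [PySem.List.slice_to lines (by omega)]
  have htne : lines.take (k + 1).toNat ≠ [] := by
    simp only [ne_eq, List.take_eq_nil_iff, not_or]
    constructor
    · omega
    · exact hne
  exact pvJoinLen _ htne
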